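-- pv_equiv track=rewrite | github.com/Koe1539/AI_Project | Day1/220627_3.py | get_sb
-- ===== SOURCE A (Python) =====
-- def get_sb(a, b):
--     s = 0
--     bb = 0
--     for i in range(len(a)):
--         if a[i] == b[i]:
--             s += 1
--     for i in a:
--         for ii in b:
--             if i == ii:
--                 bb += 1
--     return s, bb-s
-- ===== SOURCE B (Python) =====
-- def get_sb(a, b):
--     s = 0
--     for i in range(len(a)):
--         if a[i] == b[i]:
--             s += 1
--     sa = sorted(a)
--     sb = sorted(b)
--     total = 0
--     i = 0
--     j = 0
--     while i < len(sa) and j < len(sb):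
--         if sa[i] < sb[j]:
--             i += 1
--         elif sb[j] < sa[i]:
--             j += 1
--         else:
--             v = sa[i]
--             ci = 0
--             while i < len(sa) and sa[i] == v:
--                 ci += 1
--                 i += 1
--             cj = 0
--             while j < len(sb) and sb[j] == v:
--                 cj += 1
--                 j += 1
--             total += ci * cj
--     return s, total - s
-- ===== Notes on version B (the rewrite author's own statement) =====
-- stated objective: faster
-- what changed: B replaces A's nested O(n*m) rescan by sort-then-merge: it sorts copies of both lists and runs a two-pointer merge that, for each shared value, multiplies the run lengths of that value in the two sorted lists; positional matches are counted by the same indexed loop so the IndexError domain is unchanged.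
import Mathlib
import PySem

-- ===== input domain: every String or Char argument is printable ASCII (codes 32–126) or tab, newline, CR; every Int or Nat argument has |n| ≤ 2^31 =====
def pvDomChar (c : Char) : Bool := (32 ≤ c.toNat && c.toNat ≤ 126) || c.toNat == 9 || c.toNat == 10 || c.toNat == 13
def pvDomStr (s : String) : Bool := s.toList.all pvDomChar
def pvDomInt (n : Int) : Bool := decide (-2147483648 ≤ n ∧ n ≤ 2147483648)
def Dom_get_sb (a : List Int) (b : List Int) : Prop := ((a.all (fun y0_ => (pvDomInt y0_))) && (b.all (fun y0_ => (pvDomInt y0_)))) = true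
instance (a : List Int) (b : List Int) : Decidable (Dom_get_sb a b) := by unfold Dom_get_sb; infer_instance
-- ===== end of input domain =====

-- B replaces A's nested rescan by sort-then-merge (two-pointer run products); same indexed positional loop.
-- ===== PORT A =====
-- pyGetD with default 0 is exact here: Pre_get_sb keeps every index of the loop in range for both lists.
def get_sb (a : List Int) (b : List Int) : Int × Int :=
  let s : Int := (PySem.List.pyRange 0 a.length 1).foldl
    (fun s i => if PySem.List.pyGetD a i 0 = PySem.List.pyGetD b i 0 then s + 1 else s) 0
  let bb : Int := a.foldl
    (fun bb i => b.foldl (fun bb ii => if i = ii then bb + 1 else bb) bb) 0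
  (s, bb - s)

-- ===== PORT B =====
-- B's two-pointer while loop over the sorted arrays, as structural recursion on the
-- two suffixes; the inner run-counting while loops become takeWhile/dropWhile on the suffix.
def pvMergeRuns : List Int → List Int → Int
  | [], _ => 0
  | _ :: _, [] => 0
  | x :: xs, y :: ys =>
    if x < y then pvMergeRuns xs (y :: ys)
    else if y < x then pvMergeRuns (x :: xs) ys
    else
      let ci : Int := 1 + (xs.takeWhile (fun z => z == x)).length
      let cj : Int := 1 + (ys.takeWhile (fun z => z == x)).length
      ci * cj + pvMergeRuns (xs.dropWhile (fun z => z == x)) (ys.dropWhile (fun z => z == x))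
termination_by l₁ l₂ => l₁.length + l₂.length
decreasing_by
  all_goals
    first
    | (simp <;> omega)
    | (have h1 := List.length_dropWhile_le (fun z => z == x) xs
       have h2 := List.length_dropWhile_le (fun z => z == x) ys
       simp at *; omega)

def get_sb_alt (a : List Int) (b : List Int) : Int × Int :=
  let s : Int := (PySem.List.pyRange 0 a.length 1).foldl
    (fun s i => if PySem.List.pyGetD a i 0 = PySem.List.pyGetD b i 0 then s + 1 else s) 0
  let sa := PySem.List.sorted a (fun x => x) false
  let sb := PySem.List.sorted b (fun x => x) false
  let total : Int := pvMergeRuns sa sb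
  (s, total - s)

-- ===== PRECONDITION & SPEC =====
-- Pre_ excludes exactly the inputs where A (and B's identical positional loop) raises IndexError (b shorter than a).
def Pre_get_sb (a : List Int) (b : List Int) : Prop := a.length ≤ b.length
instance (a : List Int) (b : List Int) : Decidable (Pre_get_sb a b) := by unfold Pre_get_sb; infer_instance
def pvWitness_get_sb : List Int × List Int := ([1, 2, 3], [3, 2, 1])

def Spec_get_sb (a : List Int) (b : List Int) (out : Int × Int) : Prop := out = get_sb_alt a b
instance (a : List Int) (b : List Int) (out : Int × Int) : Decidable (Spec_get_sb a b out) := by unfold Spec_get_sb; infer_instance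

-- ===== CLAIM (what is proved, stated in full; the proofs are below) =====
def Claim_equal_get_sb : Prop := ∀ (a : List Int) (b : List Int), Dom_get_sb a b → Pre_get_sb a b → Spec_get_sb a b (get_sb a b)

-- ===== LEMMAS AND PROOFS =====

-- A's inner scan of b adds the number of occurrences of i in b
theorem pv_inner_count (b : List Int) (i : Int) : ∀ (init : Int),
    b.foldl (fun bb ii => if i = ii then bb + 1 else bb) init = init + (b.count i : Int) := by
  induction b with
  | nil => intro init; simp
  | cons y ys ih =>
    intro init
    simp only [List.foldl]
    rw [ih, List.count_cons]
    by_cases hy : i = y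
    · rw [if_pos hy, if_pos (by simp [hy] : (y == i) = true)]
      push_cast; omega
    · rw [if_neg hy, if_neg (by simp [Ne.symm hy] : ¬ (y == i) = true)]
      push_cast; omega

-- A's nested loop = sum of counts over a
theorem pv_bbA (b : List Int) : ∀ (a : List Int) (init : Int),
    a.foldl (fun bb i => b.foldl (fun bb ii => if i = ii then bb + 1 else bb) bb) init
      = init + (a.map (fun x => (b.count x : Int))).sum := by
  intro a
  induction a with
  | nil => intro init; simp
  | cons x xs ih =>
    intro init
    simp only [List.foldl, List.map, List.sum_cons]
    rw [pv_inner_count, ih]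
    ring

-- in a sorted list, everything after the leading run of x is strictly greater than x
theorem pv_dropWhile_gt (x : Int) : ∀ (l : List Int), l.Pairwise (· ≤ ·) → (∀ e ∈ l, x ≤ e) →
    ∀ e ∈ l.dropWhile (fun z => z == x), x < e := by
  intro l
  induction l with
  | nil => intro _ _ e he; simp [List.dropWhile] at he
  | cons h t ih =>
    intro hp hge e he
    by_cases hh : h = x
    · rw [List.dropWhile_cons_of_pos (by simp [hh])] at he
      exact ih hp.tail (fun e' he' => hge e' (List.mem_cons_of_mem _ he')) e he
    · rw [List.dropWhile_cons_of_neg (by simp [hh])] at he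
      have hx : x < h := lt_of_le_of_ne (hge h (List.mem_cons_self)) (Ne.symm hh)
      rcases List.mem_cons.mp he with rfl | he'
      · exact hx
      · exact lt_of_lt_of_le hx (List.rel_of_pairwise_cons hp he')

-- main lemma: on sorted lists the two-pointer run merge computes the multiset-overlap count
theorem pv_merge_spec : ∀ (xs ys : List Int), xs.Pairwise (· ≤ ·) → ys.Pairwise (· ≤ ·) →
    pvMergeRuns xs ys = (xs.map (fun e => (ys.count e : Int))).sum := by
  intro xs ys hxs hys
  fun_induction pvMergeRuns xs ys with
  | case1 ys => simp
  | case2 x xs => simp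
  | case3 x xs y ys hlt ih =>
    -- x < y: x does not occur in y::ys
    have hx0 : (y :: ys).count x = 0 := by
      rw [List.count_eq_zero]
      intro hmem
      rcases List.mem_cons.mp hmem with rfl | hm
      · exact absurd hlt (lt_irrefl x)
      · exact absurd (lt_of_lt_of_le hlt (List.rel_of_pairwise_cons hys hm)) (lt_irrefl x)
    simp only [List.map, List.sum_cons, hx0]
    rw [ih hxs.tail hys]
    simp
  | case4 x xs y ys hnlt hlt ih =>
    -- y < x: y occurs in nothing of x::xs, so dropping it changes no count
    have hcong : ∀ e ∈ x :: xs, ((y :: ys).count e : Int) = (ys.count e : Int) := by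
      intro e he
      have hxe : x ≤ e := by
        rcases List.mem_cons.mp he with rfl | hm
        · exact le_refl e
        · exact List.rel_of_pairwise_cons hxs hm
      have hne : y ≠ e := by rintro rfl; exact absurd (lt_of_lt_of_le hlt hxe) (lt_irrefl y)
      rw [List.count_cons_of_ne hne]
    rw [List.map_congr_left hcong]
    exact ih hxs hys.tail
  | case5 x xs y ys hnlt hnlt' ci cj ih =>
    have hxy : x = y := le_antisymm (not_lt.mp hnlt') (not_lt.mp hnlt)
    subst hxy
    -- decompose both lists into leading run of x and strictly-greater remainder
    have hsplitx := List.takeWhile_append_dropWhile (p := fun z => z == x) (l := xs)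
    have hsplity := List.takeWhile_append_dropWhile (p := fun z => z == x) (l := ys)
    have htx : ∀ e ∈ xs.takeWhile (fun z => z == x), e = x := by
      intro e he; simpa using List.mem_takeWhile_imp he
    have hty : ∀ e ∈ ys.takeWhile (fun z => z == x), e = x := by
      intro e he; simpa using List.mem_takeWhile_imp he
    have hdx : ∀ e ∈ xs.dropWhile (fun z => z == x), x < e :=
      pv_dropWhile_gt x xs hxs.tail (fun e he => List.rel_of_pairwise_cons hxs he)
    have hdy : ∀ e ∈ ys.dropWhile (fun z => z == x), x < e :=
      pv_dropWhile_gt x ys hys.tail (fun e he => List.rel_of_pairwise_cons hys he)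
    -- count of x in x::ys is 1 + run length in ys
    have hcx : (x :: ys).count x = 1 + (ys.takeWhile (fun z => z == x)).length := by
      rw [List.count_cons_self]
      have : ys.count x = (ys.takeWhile (fun z => z == x)).length := by
        conv_lhs => rw [← hsplity]
        rw [List.count_append]
        have h1 : (ys.takeWhile (fun z => z == x)).count x
            = (ys.takeWhile (fun z => z == x)).length := by
          rw [List.count_eq_length]
          intro e he; simp [hty e he]
        have h2 : (ys.dropWhile (fun z => z == x)).count x = 0 := by
          rw [List.count_eq_zero]
          intro hm; exact absurd (hdy x hm) (lt_irrefl x)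
        rw [h1, h2]
        omega
      omega
    -- counts of the strictly-greater remainder of xs are unaffected by the run of x in x::ys
    have hcd : ∀ e ∈ xs.dropWhile (fun z => z == x),
        ((x :: ys).count e : Int) = ((ys.dropWhile (fun z => z == x)).count e : Int) := by
      intro e he
      have hgt := hdx e he
      have hne : e ≠ x := by rintro rfl; exact absurd hgt (lt_irrefl e)
      rw [List.count_cons_of_ne (Ne.symm hne)]
      conv_lhs => rw [← hsplity]
      rw [List.count_append]
      have : (ys.takeWhile (fun z => z == x)).count e = 0 := by
        rw [List.count_eq_zero]
        intro hm; exact hne (hty e hm)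
      rw [this]
      simp
    -- sorted remainders for the recursive call
    have hpx : (xs.dropWhile (fun z => z == x)).Pairwise (· ≤ ·) :=
      hxs.tail.sublist (List.dropWhile_sublist _)
    have hpy : (ys.dropWhile (fun z => z == x)).Pairwise (· ≤ ·) :=
      hys.tail.sublist (List.dropWhile_sublist _)
    rw [ih hpx hpy]
    -- now pure summation over the decomposition xs = take ++ drop
    conv_rhs => rw [List.map_cons, List.sum_cons, ← hsplitx, List.map_append, List.sum_append]
    have hruns : ((xs.takeWhile (fun z => z == x)).map (fun e => (((x :: ys).count e : Nat) : Int))).sum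
        = ((xs.takeWhile (fun z => z == x)).length : Int) * ((x :: ys).count x : Int) := by
      have : ∀ e ∈ xs.takeWhile (fun z => z == x),
          (((x :: ys).count e : Nat) : Int) = ((x :: ys).count x : Int) := by
        intro e he; rw [htx e he]
      rw [List.map_congr_left this, List.map_const', List.sum_replicate, nsmul_eq_mul]
    have hdrops : ((xs.dropWhile (fun z => z == x)).map (fun e => (((x :: ys).count e : Nat) : Int))).sum
        = ((xs.dropWhile (fun z => z == x)).map
            (fun e => (((ys.dropWhile (fun z => z == x)).count e : Nat) : Int))).sum := by
      exact congrArg List.sum (List.map_congr_left hcd)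
    rw [hruns, ← hdrops, hcx]
    push_cast
    ring

theorem get_sb_spec : Claim_equal_get_sb := by
  intro a b _ _
  unfold Spec_get_sb get_sb get_sb_alt
  have hpa : (PySem.List.sorted a (fun x => x) false).Perm a := PySem.List.sorted_perm a _ _
  have hpb : (PySem.List.sorted b (fun x => x) false).Perm b := PySem.List.sorted_perm b _ _
  have hbb : a.foldl (fun bb i => b.foldl (fun bb ii => if i = ii then bb + 1 else bb) bb) (0 : Int)
      = pvMergeRuns (PySem.List.sorted a (fun x => x) false) (PySem.List.sorted b (fun x => x) false) := by
    rw [pv_bbA, pv_merge_spec _ _ (PySem.List.sorted_pairwise a _) (PySem.List.sorted_pairwise b _)]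
    have hcnt : ∀ e ∈ PySem.List.sorted a (fun x => x) false,
        (((PySem.List.sorted b (fun x => x) false).count e : Nat) : Int) = ((b.count e : Nat) : Int) := by
      intro e _; rw [hpb.count_eq]
    rw [List.map_congr_left hcnt, (hpa.map (fun x => (b.count x : Int))).sum_eq]
    ring
  simp only [hbb]
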